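-- pv_equiv track=rewrite | github.com/Lin-Kernighan/Lin-Kernighan | playground/python/src/structures/matrix.py | _sort_topologically
-- ===== SOURCE A (Python) =====
-- from collections import deque, defaultdict
-- from typing import Dict
--
-- def _sort_topologically(first: int, topology: Dict):
--     """ node -> dad; in fact this is Depth-first search """
--     ancestors = defaultdict(list)
--     for key, pred in topology.items():
--         ancestors[pred] += [key]
--
--     res = []
--     deq = deque()
--     deq.append(first)
--
--     while deq:
--         node = deq.popleft()
--         res += [node]
--         deq.extend(ancestors[node])
--
--     return res
-- ===== SOURCE B (Python) =====
-- from typing import Dict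
--
-- def _sort_topologically(first: int, topology: Dict):
--     """Iterative depth-first search bucketing nodes by depth; concatenating the
--     depth buckets yields the breadth-first order without any queue."""
--     children = {}
--     for key, pred in topology.items():
--         children.setdefault(pred, []).append(key)
--
--     levels = []
--     stack = [(0, first)]
--     while stack:
--         depth, node = stack.pop()
--         if depth == len(levels):
--             levels.append([])
--         levels[depth].append(node)
--         for child in reversed(children.get(node, [])):
--             stack.append((depth + 1, child))
--
--     res = []
--     for level in levels:
--         res += level
--     return res
-- ===== Notes on version B (the rewrite author's own statement) =====
-- stated objective: alternative
-- what changed: Replaces the BFS queue entirely: B runs an iterative depth-first search with an explicit stack of (depth, node) pairs, appends each visited node to a per-depth bucket, and returns the concatenation of the buckets, which equals A's breadth-first order.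
import Mathlib
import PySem

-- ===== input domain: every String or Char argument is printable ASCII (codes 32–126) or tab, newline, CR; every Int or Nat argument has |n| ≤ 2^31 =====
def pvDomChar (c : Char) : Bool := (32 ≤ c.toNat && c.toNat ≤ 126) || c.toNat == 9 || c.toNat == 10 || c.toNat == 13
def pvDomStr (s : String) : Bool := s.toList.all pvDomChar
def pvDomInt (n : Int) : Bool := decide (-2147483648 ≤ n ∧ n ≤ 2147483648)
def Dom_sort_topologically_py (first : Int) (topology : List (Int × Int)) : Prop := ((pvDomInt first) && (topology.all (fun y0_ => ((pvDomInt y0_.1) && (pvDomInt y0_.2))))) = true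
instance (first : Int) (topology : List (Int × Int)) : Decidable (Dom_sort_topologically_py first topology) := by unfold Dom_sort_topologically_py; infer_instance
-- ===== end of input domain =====

-- B replaces A's queue-based BFS by an iterative depth-first search (explicit stack) that
-- buckets each visited node by its depth and concatenates the buckets: alternative algorithm, same cost.


-- ===== PORT A =====
-- ancestors = defaultdict(list); for key, pred in topology.items(): ancestors[pred] += [key]
def pvAncA (topology : List (Int × Int)) : PySem.Dict Int (List Int) :=
  topology.foldl (fun d p => d.modify p.2 [] (fun l => l ++ [p.1])) PySem.Dict.empty

-- while deq: node = deq.popleft(); res += [node]; deq.extend(ancestors[node])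
-- (fuel artifact: |topology| + 1 pops suffice on every input where the Python loop terminates)
def pvBfsA (c : Int → List Int) : Nat → List Int → List Int → List Int
  | 0, res, _ => res
  | _ + 1, res, [] => res
  | f + 1, res, x :: q => pvBfsA c f (res ++ [x]) (q ++ c x)

def sort_topologically_py (first : Int) (topology : List (Int × Int)) : List Int :=
  pvBfsA (fun v => (pvAncA topology).getD v []) (topology.length + 1) [] [first]

-- ===== PORT B =====
-- children = {}; children.setdefault(pred, []).append(key)
def pvAncB (topology : List (Int × Int)) : PySem.Dict Int (List Int) :=
  topology.foldl (fun d p =>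
    match d.get? p.2 with
    | none => d.insert p.2 [p.1]
    | some l => d.insert p.2 (l ++ [p.1])) PySem.Dict.empty

-- if depth == len(levels): levels.append([]);  levels[depth].append(node)
def pvStepB (lv : List (List Int)) (d : Nat) (x : Int) : List (List Int) :=
  let lv1 := if d = lv.length then lv ++ [[]] else lv
  lv1.set d (lv1.getD d [] ++ [x])

-- while stack: depth, node = stack.pop(); …; for child in reversed(children.get(node, [])): stack.append((depth+1, child))
-- (stack top = list head; fuel artifact: |topology| + 1 visits suffice wherever the Python loop terminates)
def pvDfsB (c : Int → List Int) : Nat → List (List Int) → List (Nat × Int) → List (List Int)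
  | 0, lv, _ => lv
  | _ + 1, lv, [] => lv
  | f + 1, lv, (d, x) :: st =>
      pvDfsB c f (pvStepB lv d x) ((c x).reverse.foldl (fun s ch => (d + 1, ch) :: s) st)

def sort_topologically_py_alt (first : Int) (topology : List (Int × Int)) : List Int :=
  (pvDfsB (fun v => (pvAncB topology).getD v []) (topology.length + 1) [] [(0, first)]).foldl
    (fun r lv => r ++ lv) []

-- ===== PRECONDITION & SPEC =====
def pvChain (topology : List (Int × Int)) : Nat → Int → Option Int
  | 0, x => some x
  | i + 1, x =>
    match (PySem.Dict.ofList topology).get? x with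
    | some p => pvChain topology i p
    | none => none

-- Pre_ requires distinct keys (an association list with duplicate keys represents no Python dict)
-- and excludes exactly the inputs on which A's while-loop never returns: those where following
-- parent links from `first` comes back to `first` (a parent cycle through the start node).
def Pre_sort_topologically_py (first : Int) (topology : List (Int × Int)) : Prop :=
  (topology.map Prod.fst).Nodup ∧
    ∀ i ∈ List.range topology.length, pvChain topology (i + 1) first ≠ some first
instance (first : Int) (topology : List (Int × Int)) : Decidable (Pre_sort_topologically_py first topology) := by
  unfold Pre_sort_topologically_py; infer_instance

def pvWitness_sort_topologically_py : Int × (List (Int × Int)) := (0, [(1, 0), (2, 0), (3, 1)])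

def Spec_sort_topologically_py (first : Int) (topology : List (Int × Int)) (out : List Int) : Prop := out = sort_topologically_py_alt first topology
instance (first : Int) (topology : List (Int × Int)) (out : List Int) : Decidable (Spec_sort_topologically_py first topology out) := by unfold Spec_sort_topologically_py; infer_instance

-- ===== CLAIM (what is proved, stated in full; the proofs are below) =====
def Claim_equal_sort_topologically_py : Prop := ∀ (first : Int) (topology : List (Int × Int)), Dom_sort_topologically_py first topology → Pre_sort_topologically_py first topology → Spec_sort_topologically_py first topology (sort_topologically_py first topology)

-- ===== LEMMAS AND PROOFS =====

-- the two child-map builds are the same dict (defaultdict += vs setdefault-append)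
lemma pvAnc_eq (topology : List (Int × Int)) : pvAncA topology = pvAncB topology := by
  unfold pvAncA pvAncB
  congr 1
  funext d p
  cases h : d.get? p.2 <;>
    simp [PySem.Dict.modify, PySem.Dict.getD_eq_get?_getD, h]

-- the children of p are the keys whose stored parent is p, in topology order
lemma pvChild_eq (topology : List (Int × Int)) (p : Int) :
    (pvAncB topology).getD p [] = (topology.filter (fun q => q.2 == p)).map Prod.fst := by
  rw [← pvAnc_eq]
  have h1 : pvAncA topology
      = (topology.map Prod.swap).foldl (fun d q => d.modify q.1 [] (fun l => l ++ [q.2])) PySem.Dict.empty := by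
    unfold pvAncA
    rw [List.foldl_map]
    simp [Prod.swap]
  rw [h1, PySem.Dict.getD_foldl_modify_append]
  simp [List.filter_map, List.map_map, Function.comp_def, Prod.swap]

-- ======== frontier iteration (the k-th BFS level) ========
def pvIter (c : Int → List Int) : Nat → List Int → List Int
  | 0, ns => ns
  | k + 1, ns => pvIter c k (ns.flatMap c)

lemma pvIter_nil (c : Int → List Int) : ∀ k, pvIter c k [] = [] := by
  intro k; induction k with
  | zero => rfl
  | succ k ih => simpa [pvIter] using ih

lemma pvIter_append (c : Int → List Int) :
    ∀ k a b, pvIter c k (a ++ b) = pvIter c k a ++ pvIter c k b := by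
  intro k
  induction k with
  | zero => intro a b; rfl
  | succ k ih => intro a b; simp [pvIter, List.flatMap_append, ih]

lemma pvIter_flatMap (c : Int → List Int) :
    ∀ ns k, pvIter c k ns = ns.flatMap (fun y => pvIter c k [y]) := by
  intro ns
  induction ns with
  | nil => intro k; simp [pvIter_nil]
  | cons y t ih =>
    intro k
    have : (y :: t) = [y] ++ t := rfl
    rw [this, pvIter_append]
    simp [ih]

lemma pvIter_add (c : Int → List Int) :
    ∀ a b ns, pvIter c (a + b) ns = pvIter c b (pvIter c a ns) := by
  intro a
  induction a with
  | zero => intro b ns; simp [pvIter]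
  | succ a ih =>
    intro b ns
    have h : a + 1 + b = (a + b) + 1 := by omega
    calc pvIter c (a + 1 + b) ns = pvIter c (a + b + 1) ns := by rw [h]
      _ = pvIter c (a + b) (ns.flatMap c) := rfl
      _ = pvIter c b (pvIter c a (ns.flatMap c)) := ih b (ns.flatMap c)
      _ = pvIter c b (pvIter c (a + 1) ns) := rfl

lemma pvIter_succ_singleton (c : Int → List Int) (k : Nat) (x : Int) :
    pvIter c (k + 1) [x] = (c x).flatMap (fun y => pvIter c k [y]) := by
  show pvIter c k ([x].flatMap c) = _
  rw [pvIter_flatMap]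
  simp

-- ======== chain lemmas ========
lemma pvChain_add (topology : List (Int × Int)) :
    ∀ a b x, pvChain topology (a + b) x = (pvChain topology a x).bind (pvChain topology b) := by
  intro a
  induction a with
  | zero =>
    intro b x
    simp [pvChain]
  | succ a ih =>
    intro b x
    have h : a + 1 + b = (a + b) + 1 := by omega
    rw [h]
    cases hp : (PySem.Dict.ofList topology).get? x with
    | none => simp [pvChain, hp]
    | some p => simp [pvChain, hp, ih b p]

-- ======== A-side loop characterisation ========
def pvTrav (c : Int → List Int) : Nat → List Int → List Int
  | 0, _ => []
  | _ + 1, [] => []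
  | f + 1, x :: q => x :: pvTrav c f (q ++ c x)

lemma pvBfsA_append (c : Int → List Int) :
    ∀ (f : Nat) (res q : List Int), pvBfsA c f res q = res ++ pvTrav c f q := by
  intro f
  induction f with
  | zero => intro res q; simp [pvBfsA, pvTrav]
  | succ f ih =>
    intro res q
    cases q with
    | nil => simp [pvBfsA, pvTrav]
    | cons x t => simp [pvBfsA, pvTrav, ih]

-- the queue loop processes a whole level as a block
lemma pvTrav_split (c : Int → List Int) :
    ∀ (q r : List Int) (f : Nat),
      pvTrav c f (q ++ r) =
        if q.length ≤ f then q ++ pvTrav c (f - q.length) (r ++ q.flatMap c) else q.take f := by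
  intro q
  induction q with
  | nil => intro r f; simp
  | cons x t ih =>
    intro r f
    cases f with
    | zero => simp [pvTrav]
    | succ g =>
      have : (x :: t) ++ r = x :: (t ++ r) := rfl
      rw [this, pvTrav, List.append_assoc]
      rw [ih (r ++ c x) g]
      by_cases h : t.length ≤ g
      · rw [if_pos h, if_pos (by simpa using Nat.succ_le_succ h)]
        simp [List.append_assoc]
      · rw [if_neg h, if_neg (by simpa using fun hh => h (Nat.le_of_succ_le_succ hh))]
        simp

-- ======== dictionary lookup facts (keys of a dict are distinct) ========
lemma pvItems_ofList (topology : List (Int × Int)) (hnd : (topology.map Prod.fst).Nodup) :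
    (PySem.Dict.ofList topology).items = topology := by
  show (topology.foldl (fun acc p => acc.insert p.1 p.2) PySem.Dict.empty).items = topology
  rw [PySem.Dict.items_foldl_insert_fresh topology Prod.fst Prod.snd PySem.Dict.empty
    (fun a _ => by simp) hnd]
  show PySem.Dict.empty.items ++ _ = _
  rw [show (PySem.Dict.empty : PySem.Dict Int Int).items = [] from rfl]
  simp

lemma pvKeys_ofList (topology : List (Int × Int)) (hnd : (topology.map Prod.fst).Nodup) :
    (PySem.Dict.ofList topology).keys = topology.map Prod.fst := by
  show ((PySem.Dict.ofList topology).items).map Prod.fst = _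
  rw [pvItems_ofList topology hnd]

lemma pvLookup (topology : List (Int × Int)) (hnd : (topology.map Prod.fst).Nodup)
    {x p : Int} (hm : (x, p) ∈ topology) :
    (PySem.Dict.ofList topology).get? x = some p := by
  apply PySem.Dict.get?_of_mem_items
  · rw [pvItems_ofList topology hnd]; exact hm
  · rw [pvKeys_ofList topology hnd]; exact hnd

lemma pvMemKeys (topology : List (Int × Int)) (hnd : (topology.map Prod.fst).Nodup)
    {x p : Int} (h : (PySem.Dict.ofList topology).get? x = some p) :
    x ∈ topology.map Prod.fst := by
  by_contra hx
  rw [← pvKeys_ofList topology hnd] at hx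
  rw [(PySem.Dict.get?_eq_none_iff_not_mem_keys _ _).2 hx] at h
  simp at h

lemma pvMemChild (topology : List (Int × Int)) {x p : Int}
    (h : x ∈ (pvAncB topology).getD p []) : (x, p) ∈ topology := by
  rw [pvChild_eq] at h
  rcases List.mem_map.1 h with ⟨q, hq, hfst⟩
  rcases List.mem_filter.1 hq with ⟨hqm, hsnd⟩
  have : q = (x, p) := by
    cases q
    simp_all
  exact this ▸ hqm

lemma pvHpar (topology : List (Int × Int)) (hnd : (topology.map Prod.fst).Nodup)
    {x p : Int} (h : x ∈ (pvAncB topology).getD p []) :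
    (PySem.Dict.ofList topology).get? x = some p :=
  pvLookup topology hnd (pvMemChild topology h)

lemma pvChildNodup (topology : List (Int × Int)) (hnd : (topology.map Prod.fst).Nodup)
    (p : Int) : ((pvAncB topology).getD p []).Nodup := by
  rw [pvChild_eq]
  exact hnd.sublist (List.filter_sublist.map Prod.fst)

-- ======== levels of the traversal from `first` ========
lemma pvFlatNodup (topology : List (Int × Int)) (hnd : (topology.map Prod.fst).Nodup) :
    ∀ ns : List Int, ns.Nodup → (ns.flatMap (fun v => (pvAncB topology).getD v [])).Nodup := by
  intro ns
  induction ns with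
  | nil => intro _; simp
  | cons a t ih =>
    intro hns
    rw [List.flatMap_cons]
    refine List.Nodup.append (pvChildNodup topology hnd a) (ih hns.of_cons) ?_
    intro x hxa hxt
    rcases List.mem_flatMap.1 hxt with ⟨b, hb, hxb⟩
    have h1 := pvHpar topology hnd hxa
    have h2 := pvHpar topology hnd hxb
    have : a = b := by rw [h1] at h2; exact Option.some.inj h2
    exact (List.nodup_cons.1 hns).1 (this ▸ hb)

lemma pvLevelNodup (topology : List (Int × Int)) (hnd : (topology.map Prod.fst).Nodup)
    (first : Int) : ∀ j, (pvIter (fun v => (pvAncB topology).getD v []) j [first]).Nodup := by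
  intro j
  induction j with
  | zero => simp [pvIter]
  | succ j ih =>
    rw [pvIter_add (fun v => (pvAncB topology).getD v []) j 1]
    exact pvFlatNodup topology hnd _ ih

lemma pvChainLevel (topology : List (Int × Int)) (hnd : (topology.map Prod.fst).Nodup)
    (first : Int) :
    ∀ (k d : Nat) (ns : List Int), (∀ y ∈ ns, pvChain topology d y = some first) →
      ∀ x ∈ pvIter (fun v => (pvAncB topology).getD v []) k ns,
        pvChain topology (k + d) x = some first := by
  intro k
  induction k with
  | zero => intro d ns h x hx; simpa [pvIter] using h x hx
  | succ k ih =>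
    intro d ns h x hx
    have hstep : ∀ y ∈ ns.flatMap (fun v => (pvAncB topology).getD v []),
        pvChain topology (d + 1) y = some first := by
      intro y hy
      rcases List.mem_flatMap.1 hy with ⟨p, hp, hyp⟩
      have hpar := pvHpar topology hnd hyp
      show pvChain topology (d + 1) y = some first
      have : pvChain topology (d + 1) y = pvChain topology d p := by
        simp [pvChain, hpar]
      rw [this]
      exact h p hp
    have := ih (d + 1) _ hstep x hx
    have harith : k + (d + 1) = (k + 1) + d := by omega
    rwa [harith] at this

lemma pvChainLevel0 (topology : List (Int × Int)) (hnd : (topology.map Prod.fst).Nodup)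
    (first : Int) {k : Nat} {x : Int}
    (hx : x ∈ pvIter (fun v => (pvAncB topology).getD v []) k [first]) :
    pvChain topology k x = some first := by
  have := pvChainLevel topology hnd first k 0 [first]
    (by intro y hy; simp at hy; simp [hy, pvChain]) x hx
  simpa using this

lemma pvNoRepeat (topology : List (Int × Int)) (first : Int)
    (hpre : ∀ i ∈ List.range topology.length, pvChain topology (i + 1) first ≠ some first)
    (x : Int) (hx1 : pvChain topology (topology.length + 1) x = some first)
    (hsome : ∀ i : Nat, i ≤ topology.length + 1 → (pvChain topology i x).isSome)
    (i j : Fin (topology.length + 1)) (hlt : (i : Nat) < (j : Nat))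
    (heq : (pvChain topology i x).getD 0 = (pvChain topology j x).getD 0) : False := by
  have hn : topology.length = topology.length := rfl
  obtain ⟨a, ha⟩ := Option.isSome_iff_exists.1 (hsome i (by omega))
  obtain ⟨b, hb⟩ := Option.isSome_iff_exists.1 (hsome j (by omega))
  rw [ha, hb] at heq
  simp only [Option.getD_some] at heq
  subst heq
  set d := (j : Nat) - (i : Nat) with hd
  set m := topology.length + 1 - (j : Nat) with hm
  have hda : pvChain topology d a = some a := by
    have h := pvChain_add topology i d x
    rw [show (i : Nat) + d = (j : Nat) from by omega, ha, hb] at h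
    simpa using h.symm
  have hma : pvChain topology m a = some first := by
    have h := pvChain_add topology j m x
    rw [show (j : Nat) + m = topology.length + 1 from by omega, hx1, hb] at h
    simpa using h.symm
  have hper : ∀ t : Nat, pvChain topology (t * d) a = some a := by
    intro t
    induction t with
    | zero => simp [pvChain]
    | succ t ih =>
      have h := pvChain_add topology (t * d) d a
      rw [show t * d + d = (t + 1) * d from by ring] at h
      rw [h, ih]
      simpa using hda
  have hr : pvChain topology (m % d) a = some first := by
    have h := pvChain_add topology ((m / d) * d) (m % d) a
    rw [show m / d * d + m % d = m from by
      rw [Nat.mul_comm]; exact Nat.div_add_mod m d] at h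
    rw [hma, hper (m / d)] at h
    simpa using h.symm
  have hfirst : pvChain topology d first = some first := by
    have e1 := pvChain_add topology (m % d) d a
    rw [hr] at e1
    simp only [Option.bind_some] at e1
    have e2 := pvChain_add topology d (m % d) a
    rw [hda] at e2
    simp only [Option.bind_some] at e2
    rw [hr] at e2
    rw [show m % d + d = d + (m % d) from by omega, e2] at e1
    exact e1.symm
  have hd1 : 1 ≤ d := by omega
  have hdn : d ≤ topology.length := by
    have := j.isLt
    omega
  have := hpre (d - 1) (by simp [List.mem_range]; omega)
  rw [show d - 1 + 1 = d from by omega] at this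
  exact this hfirst

-- ======== a repeated node forces a parent cycle through `first` (pigeonhole) ========
lemma pvCross (topology : List (Int × Int)) (hnd : (topology.map Prod.fst).Nodup) (first : Int)
    (hpre : ∀ i ∈ List.range topology.length, pvChain topology (i + 1) first ≠ some first)
    {k j : Nat} {x : Int} (hkj : k < j) (hj : j ≤ topology.length)
    (hxk : x ∈ pvIter (fun v => (pvAncB topology).getD v []) k [first])
    (hxj : x ∈ pvIter (fun v => (pvAncB topology).getD v []) j [first]) : False := by
  have h1 := pvChainLevel0 topology hnd first hxk
  have h2 := pvChainLevel0 topology hnd first hxj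
  have hsplit := pvChain_add topology k (j - k) x
  rw [show k + (j - k) = j from by omega, h2, h1] at hsplit
  simp only [Option.bind_some] at hsplit
  have := hpre (j - k - 1) (by simp [List.mem_range]; omega)
  rw [show j - k - 1 + 1 = j - k from by omega] at this
  exact this hsplit.symm

lemma pvDeath (topology : List (Int × Int)) (hnd : (topology.map Prod.fst).Nodup) (first : Int)
    (hpre : ∀ i ∈ List.range topology.length, pvChain topology (i + 1) first ≠ some first) :
    pvIter (fun v => (pvAncB topology).getD v []) (topology.length + 1) [first] = [] := by
  set n := topology.length with hn
  by_contra hne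
  obtain ⟨x, hx⟩ := List.exists_mem_of_ne_nil _ hne
  have hx1 : pvChain topology (n + 1) x = some first := pvChainLevel0 topology hnd first hx
  have hsome : ∀ i : Nat, i ≤ n + 1 → (pvChain topology i x).isSome := by
    intro i hi
    have hsplit := pvChain_add topology i (n + 1 - i) x
    rw [show i + (n + 1 - i) = n + 1 from by omega, hx1] at hsplit
    cases h : pvChain topology i x with
    | none => rw [h] at hsplit; simp at hsplit
    | some _ => simp
  have hkey : ∀ i : Fin (n + 1), (pvChain topology i x).getD 0 ∈ (topology.map Prod.fst).toFinset := by
    intro i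
    obtain ⟨a, ha⟩ := Option.isSome_iff_exists.1 (hsome i (by omega))
    obtain ⟨b, hb⟩ := Option.isSome_iff_exists.1 (hsome ((i : Nat) + 1) (by omega))
    have hsplit := pvChain_add topology i 1 x
    rw [ha, hb] at hsplit
    simp only [Option.bind_some] at hsplit
    have hget : (PySem.Dict.ofList topology).get? a = some b := by
      cases hg : (PySem.Dict.ofList topology).get? a with
      | none => rw [show pvChain topology 1 a = none from by simp [pvChain, hg]] at hsplit; exact absurd hsplit (by simp)
      | some p =>
        rw [show pvChain topology 1 a = some p from by simp [pvChain, hg]] at hsplit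
        exact hsplit.symm
    rw [ha]
    simp only [Option.getD_some]
    exact List.mem_toFinset.2 (pvMemKeys topology hnd hget)
  obtain ⟨i, -, j, -, hij, heq⟩ :=
    Finset.exists_ne_map_eq_of_card_lt_of_maps_to
      (s := (Finset.univ : Finset (Fin (n + 1))))
      (t := (topology.map Prod.fst).toFinset)
      (by
        have h1 : (topology.map Prod.fst).toFinset.card ≤ n := by
          simpa using List.toFinset_card_le (topology.map Prod.fst)
        simp only [Finset.card_univ, Fintype.card_fin]
        omega)
      (fun i _ => hkey i)
  -- order the two indices
  rcases Nat.lt_or_ge (i : Nat) (j : Nat) with hlt | hge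
  case _ => exact pvNoRepeat topology first hpre x hx1 hsome i j hlt heq
  case _ =>
    have hlt : (j : Nat) < (i : Nat) := by
      rcases Nat.lt_or_ge (j : Nat) (i : Nat) with h | h
      · exact h
      · exact absurd (Fin.ext (by omega)) hij
    exact pvNoRepeat topology first hpre x hx1 hsome j i hlt heq.symm

-- ======== all visited nodes are distinct and drawn from first :: keys ========
lemma pvJNodup (topology : List (Int × Int)) (hnd : (topology.map Prod.fst).Nodup) (first : Int)
    (hpre : ∀ i ∈ List.range topology.length, pvChain topology (i + 1) first ≠ some first) :
    ∀ m, m ≤ topology.length + 1 →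
      ((List.range m).flatMap (fun j => pvIter (fun v => (pvAncB topology).getD v []) j [first])).Nodup := by
  intro m
  induction m with
  | zero => intro _; simp
  | succ m ih =>
    intro hm
    rw [List.range_succ, List.flatMap_append]
    refine List.Nodup.append (ih (by omega)) (by simpa using pvLevelNodup topology hnd first m) ?_
    intro x hx1 hx2
    rcases List.mem_flatMap.1 hx1 with ⟨k, hk, hxk⟩
    rw [List.mem_range] at hk
    simp only [List.flatMap_cons, List.flatMap_nil, List.append_nil] at hx2
    exact pvCross topology hnd first hpre hk (by omega) hxk hx2

lemma pvJSub (topology : List (Int × Int)) (hnd : (topology.map Prod.fst).Nodup) (first : Int)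
    {m : Nat} {x : Int}
    (hx : x ∈ (List.range m).flatMap (fun j => pvIter (fun v => (pvAncB topology).getD v []) j [first])) :
    x ∈ first :: topology.map Prod.fst := by
  rcases List.mem_flatMap.1 hx with ⟨k, _, hxk⟩
  cases k with
  | zero =>
    simp only [pvIter] at hxk
    simp at hxk
    simp [hxk]
  | succ k =>
    have hch := pvChainLevel0 topology hnd first hxk
    cases hg : (PySem.Dict.ofList topology).get? x with
    | none => rw [show pvChain topology (k + 1) x = none from by simp [pvChain, hg]] at hch; exact absurd hch (by simp)
    | some p => exact List.mem_cons_of_mem _ (pvMemKeys topology hnd hg)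

lemma pvCount (topology : List (Int × Int)) (hnd : (topology.map Prod.fst).Nodup) (first : Int)
    (hpre : ∀ i ∈ List.range topology.length, pvChain topology (i + 1) first ≠ some first) :
    ((List.range (topology.length + 1)).flatMap
      (fun j => pvIter (fun v => (pvAncB topology).getD v []) j [first])).length ≤ topology.length + 1 := by
  set J := (List.range (topology.length + 1)).flatMap
      (fun j => pvIter (fun v => (pvAncB topology).getD v []) j [first]) with hJ
  have hnodup : J.Nodup := pvJNodup topology hnd first hpre _ le_rfl
  have h1 : J.length = J.toFinset.card := (List.toFinset_card_of_nodup hnodup).symm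
  have h2 : J.toFinset ⊆ (first :: topology.map Prod.fst).toFinset := by
    intro x hx
    exact List.mem_toFinset.2 (pvJSub topology hnd first (List.mem_toFinset.1 hx))
  calc J.length = J.toFinset.card := h1
    _ ≤ (first :: topology.map Prod.fst).toFinset.card := Finset.card_le_card h2
    _ ≤ (first :: topology.map Prod.fst).length := List.toFinset_card_le _
    _ = topology.length + 1 := by simp

-- ======== the queue loop emits the levels in order ========
lemma pvTravLevels (c : Int → List Int) :
    ∀ (m : Nat) (f : Nat) (fr : List Int), pvIter c m fr = [] →
      ((List.range m).map (fun j => (pvIter c j fr).length)).sum ≤ f →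
      pvTrav c f fr = (List.range m).flatMap (fun j => pvIter c j fr) := by
  intro m
  induction m with
  | zero =>
    intro f fr hdead _
    have : fr = [] := hdead
    subst this
    cases f <;> simp [pvTrav]
  | succ m ih =>
    intro f fr hdead hsum
    have hshift : (List.range (m + 1)).map (fun j => (pvIter c j fr).length)
        = fr.length :: (List.range m).map (fun j => (pvIter c j (fr.flatMap c)).length) := by
      rw [List.range_succ_eq_map]
      simp only [List.map_cons, List.map_map]
      rfl
    rw [hshift] at hsum
    simp only [List.sum_cons] at hsum
    have hlen : fr.length ≤ f := by omega
    have hsplit := pvTrav_split c fr [] f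
    rw [List.append_nil, if_pos hlen, List.nil_append] at hsplit
    rw [hsplit, ih (f - fr.length) (fr.flatMap c) hdead (by omega)]
    rw [List.range_succ_eq_map]
    simp only [List.flatMap_cons, List.flatMap_map]
    rfl

-- ======== B-machine: visit sequence and bucket accumulation ========
lemma pvPushAux (g : Int → Nat × Int) :
    ∀ (l : List Int) (s : List (Nat × Int)),
      l.foldl (fun s ch => g ch :: s) s = l.reverse.map g ++ s := by
  intro l
  induction l with
  | nil => intro s; simp
  | cons a t ih => intro s; simp [ih]

lemma pvPush (g : Int → Nat × Int) (l : List Int) (s : List (Nat × Int)) :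
    l.reverse.foldl (fun s ch => g ch :: s) s = l.map g ++ s := by
  rw [pvPushAux g l.reverse s, List.reverse_reverse]

-- the visit sequence of the DFS loop (depth, node), in visit order
def pvVisits (c : Int → List Int) : Nat → List (Nat × Int) → List (Nat × Int)
  | 0, _ => []
  | _ + 1, [] => []
  | f + 1, (d, x) :: st => (d, x) :: pvVisits c f ((c x).map (fun ch => (d + 1, ch)) ++ st)

lemma pvDfsB_eq_foldl (c : Int → List Int) :
    ∀ (f : Nat) (lv : List (List Int)) (st : List (Nat × Int)),
      pvDfsB c f lv st = (pvVisits c f st).foldl (fun acc p => pvStepB acc p.1 p.2) lv := by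
  intro f
  induction f with
  | zero => intro lv st; simp [pvDfsB, pvVisits]
  | succ f ih =>
    intro lv st
    cases st with
    | nil => simp [pvDfsB, pvVisits]
    | cons p st =>
      obtain ⟨d, x⟩ := p
      show pvDfsB c f (pvStepB lv d x) _ = _
      rw [pvPush (fun ch => (d + 1, ch)) (c x) st, ih]
      rfl

lemma pvStepB_length {lv : List (List Int)} {d : Nat} (x : Int) (h : d ≤ lv.length) :
    (pvStepB lv d x).length = max lv.length (d + 1) := by
  unfold pvStepB
  by_cases hd : d = lv.length
  · simp [hd]
  · have : d < lv.length := by omega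
    simp [hd]
    omega

lemma pvStepB_getD {lv : List (List Int)} {d : Nat} (x : Int) (h : d ≤ lv.length) (k : Nat) :
    (pvStepB lv d x).getD k [] = lv.getD k [] ++ (if k = d then [x] else []) := by
  unfold pvStepB
  by_cases hd : d = lv.length
  · subst hd
    by_cases hk : k = lv.length
    · subst hk
      rw [List.getD_eq_getElem?_getD, List.getElem?_set]
      simp [List.getD_eq_getElem?_getD]
    · rw [List.getD_eq_getElem?_getD, List.getElem?_set, if_neg (by omega)]
      by_cases hlt : k < lv.length
      · simp [List.getD_eq_getElem?_getD, List.getElem?_append_left hlt, hk]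
      · have : lv.length + 1 ≤ k := by omega
        rw [List.getElem?_eq_none (by simp; omega)]
        rw [List.getD_eq_getElem?_getD, List.getElem?_eq_none (by omega)]
        simp [hk]
  · have hdlt : d < lv.length := by omega
    rw [if_neg hd]
    by_cases hk : k = d
    · subst hk
      rw [List.getD_eq_getElem?_getD, List.getElem?_set]
      simp [hdlt, List.getD_eq_getElem?_getD]
    · rw [List.getD_eq_getElem?_getD, List.getElem?_set, if_neg (by omega)]
      simp [List.getD_eq_getElem?_getD, hk]

-- validity of a visit sequence: each depth is at most the current bucket count
def pvGraded : Nat → List (Nat × Int) → Prop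
  | _, [] => True
  | L, (d, _) :: vs => d ≤ L ∧ pvGraded (max L (d + 1)) vs

lemma pvGradedVisits (c : Int → List Int) :
    ∀ (f : Nat) (st : List (Nat × Int)) (L : Nat), (∀ p ∈ st, p.1 ≤ L) →
      pvGraded L (pvVisits c f st) := by
  intro f
  induction f with
  | zero => intro st L _; simp [pvVisits, pvGraded]
  | succ f ih =>
    intro st L hst
    cases st with
    | nil => simp [pvVisits, pvGraded]
    | cons p st =>
      obtain ⟨d, x⟩ := p
      refine ⟨hst (d, x) (by simp), ?_⟩
      apply ih
      intro q hq
      rcases List.mem_append.1 hq with hq | hq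
      · rcases List.mem_map.1 hq with ⟨ch, _, rfl⟩
        simp
      · have := hst q (List.mem_cons_of_mem _ hq)
        omega

lemma pvSelfMap (lv : List (List Int)) :
    (List.range lv.length).map (fun k => lv.getD k []) = lv := by
  apply List.ext_getElem
  · simp
  · intro i h1 h2
    simp only [List.getElem_map, List.getElem_range]
    rw [List.getD_eq_getElem _ _ h2]

lemma pvFoldBuckets :
    ∀ (vs : List (Nat × Int)) (lv : List (List Int)), pvGraded lv.length vs →
      vs.foldl (fun acc p => pvStepB acc p.1 p.2) lv
        = (List.range (vs.foldl (fun m p => max m (p.1 + 1)) lv.length)).map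
            (fun k => lv.getD k [] ++ (vs.filter (fun p => p.1 == k)).map Prod.snd) := by
  intro vs
  induction vs with
  | nil =>
    intro lv _
    simp only [List.foldl_nil, List.filter_nil, List.map_nil, List.append_nil]
    exact (pvSelfMap lv).symm
  | cons p vs ih =>
    intro lv hg
    obtain ⟨d, x⟩ := p
    obtain ⟨h1, h2⟩ := hg
    rw [List.foldl_cons, ih (pvStepB lv d x) (by rw [pvStepB_length x h1]; exact h2)]
    rw [List.foldl_cons]
    rw [show (max lv.length (d + 1)) = (pvStepB lv d x).length from (pvStepB_length x h1).symm]
    apply List.map_congr_left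
    intro k _
    rw [pvStepB_getD x h1 k, List.filter_cons]
    by_cases hk : k = d
    · subst hk
      simp
    · have : ¬ ((d, x).1 == k) := by simp; omega
      simp only [this, Bool.false_eq_true, if_false]
      simp [hk]

-- ======== fuel accounting: the number of nodes in the subtree below (d, x) ========
def pvSz (c : Int → List Int) (N d : Nat) (x : Int) : Nat :=
  ((List.range (N - d)).map (fun j => (pvIter c j [x]).length)).sum

lemma pvSumSwap {α β : Type} (f : α → β → Nat) :
    ∀ (l1 : List α) (l2 : List β),
      (l1.map (fun a => (l2.map (f a)).sum)).sum = (l2.map (fun b => (l1.map (fun a => f a b)).sum)).sum := by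
  intro l1
  induction l1 with
  | nil => intro l2; simp
  | cons a t ih => intro l2; simp [ih, List.sum_map_add]

lemma pvSz_pos {c : Int → List Int} {N d : Nat} {x : Int}
    (hdead : pvIter c (N - d) [x] = []) : 1 ≤ pvSz c N d x := by
  have hNd : N - d ≠ 0 := by
    intro h
    rw [h] at hdead
    simp [pvIter] at hdead
  unfold pvSz
  have h0 : (1 : Nat) ∈ (List.range (N - d)).map (fun j => (pvIter c j [x]).length) := by
    apply List.mem_map.2
    exact ⟨0, by simp [List.mem_range]; omega, by simp [pvIter]⟩
  exact List.single_le_sum (fun _ _ => Nat.zero_le _) _ h0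

lemma pvSz_succ {c : Int → List Int} {N d : Nat} (x : Int) (hdN : d < N) :
    pvSz c N d x = 1 + ((c x).map (pvSz c N (d + 1))).sum := by
  unfold pvSz
  rw [show N - d = (N - (d + 1)) + 1 from by omega]
  rw [List.range_succ_eq_map]
  simp only [List.map_cons, List.sum_cons, List.map_map]
  show (1 : Nat) + _ = 1 + _
  congr 1
  have hcomp : ∀ j : Nat, (pvIter c (j + 1) [x]).length
      = ((c x).map (fun y => (pvIter c j [y]).length)).sum := by
    intro j
    rw [pvIter_succ_singleton]
    rw [List.length_flatMap]
  calc ((List.range (N - (d + 1))).map ((fun j => (pvIter c j [x]).length) ∘ Nat.succ)).sum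
      = ((List.range (N - (d + 1))).map (fun j => ((c x).map (fun y => (pvIter c j [y]).length)).sum)).sum := by
        apply congrArg
        apply List.map_congr_left
        intro j _
        exact hcomp j
    _ = ((c x).map (fun y => ((List.range (N - (d + 1))).map (fun j => (pvIter c j [y]).length)).sum)).sum := by
        rw [pvSumSwap (fun j y => (pvIter c j [y]).length)]
    _ = ((c x).map (pvSz c N (d + 1))).sum := by
        apply congrArg
        apply List.map_congr_left
        intro y _
        rfl

-- the visit sequence filtered at depth k is exactly level k of the pending subtrees
lemma pvFilterVisits (c : Int → List Int) (N : Nat) :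
    ∀ (f : Nat) (st : List (Nat × Int)),
      (∀ p ∈ st, pvIter c (N - p.1) [p.2] = []) →
      ((st.map (fun p => pvSz c N p.1 p.2)).sum ≤ f) →
      ∀ k, ((pvVisits c f st).filter (fun p => p.1 == k)).map Prod.snd
          = st.flatMap (fun p => if p.1 ≤ k then pvIter c (k - p.1) [p.2] else []) := by
  intro f
  induction f with
  | zero =>
    intro st hdead hsum k
    cases st with
    | nil => simp [pvVisits]
    | cons p st =>
      exfalso
      have h1 := pvSz_pos (hdead p (by simp))
      simp only [List.map_cons, List.sum_cons, Nat.le_zero] at hsum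
      omega
  | succ f ih =>
    intro st hdead hsum k
    cases st with
    | nil => simp [pvVisits]
    | cons p st =>
      obtain ⟨d, x⟩ := p
      have hdx : pvIter c (N - d) [x] = [] := hdead (d, x) (by simp)
      have hdN : d < N := by
        by_contra h
        rw [show N - d = 0 from by omega] at hdx
        simp [pvIter] at hdx
      set chl := (c x).map (fun ch => (d + 1, ch)) with hchl
      have hdead' : ∀ p ∈ chl ++ st, pvIter c (N - p.1) [p.2] = [] := by
        intro q hq
        rcases List.mem_append.1 hq with hq | hq
        · rcases List.mem_map.1 hq with ⟨y, hy, rfl⟩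
          simp only
          rw [show N - d = (N - (d + 1)) + 1 from by omega, pvIter_succ_singleton] at hdx
          exact List.flatMap_eq_nil_iff.1 hdx _ hy
        · exact hdead q (List.mem_cons_of_mem _ hq)
      have hsum' : ((chl ++ st).map (fun p => pvSz c N p.1 p.2)).sum ≤ f := by
        have hc : (chl.map (fun p => pvSz c N p.1 p.2)).sum = ((c x).map (pvSz c N (d + 1))).sum := by
          rw [hchl, List.map_map]
          rfl
        rw [List.map_append, List.sum_append, hc]
        have := pvSz_succ (c := c) x hdN
        simp only [List.map_cons, List.sum_cons] at hsum
        omega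
      have hIH := ih (chl ++ st) hdead' hsum' k
      show (((d, x) :: pvVisits c f (chl ++ st)).filter (fun p => p.1 == k)).map Prod.snd = _
      rw [List.filter_cons]
      rw [List.flatMap_append] at hIH
      have hchlflat : chl.flatMap (fun p => if p.1 ≤ k then pvIter c (k - p.1) [p.2] else [])
          = (c x).flatMap (fun y => if d + 1 ≤ k then pvIter c (k - (d + 1)) [y] else []) := by
        rw [hchl, List.flatMap_map]
      rw [hchlflat] at hIH
      by_cases hk : d = k
      · subst hk
        simp only [beq_self_eq_true, if_true, List.map_cons]
        have hcond : ¬ (d + 1 ≤ d) := by omega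
        simp only [if_neg hcond] at hIH
        rw [show (c x).flatMap (fun _ => ([] : List Int)) = [] from
          List.flatMap_eq_nil_iff.mpr (fun _ _ => rfl), List.nil_append] at hIH
        rw [List.flatMap_cons, hIH]
        simp [pvIter]
      · have hne : ¬ (((d, x) : Nat × Int).1 == k) := by simp; omega
        simp only [hne, Bool.false_eq_true, if_false]
        rw [hIH, List.flatMap_cons]
        rcases Nat.lt_or_ge d k with hlt | hge
        · have hcond : d + 1 ≤ k := by omega
          simp only [if_pos hcond, if_pos (show d ≤ k from by omega)]
          rw [show k - d = (k - (d + 1)) + 1 from by omega, pvIter_succ_singleton]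
        · have hcond : ¬ (d + 1 ≤ k) := by omega
          simp only [if_neg hcond, if_neg (show ¬ d ≤ k from by omega)]
          rw [show (c x).flatMap (fun _ => ([] : List Int)) = [] from
            List.flatMap_eq_nil_iff.mpr (fun _ _ => rfl)]

-- ======== bookkeeping for the number of buckets ========
lemma pvFoldMax_le :
    ∀ (vs : List (Nat × Int)) (a b : Nat), a ≤ b → (∀ p ∈ vs, p.1 + 1 ≤ b) →
      vs.foldl (fun m p => max m (p.1 + 1)) a ≤ b := by
  intro vs
  induction vs with
  | nil => intro a b h _; simpa using h
  | cons p vs ih =>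
    intro a b h hall
    rw [List.foldl_cons]
    exact ih _ b (by have := hall p (by simp); omega) (fun q hq => hall q (by simp [hq]))

lemma pvFoldMax_ge_start :
    ∀ (vs : List (Nat × Int)) (a : Nat), a ≤ vs.foldl (fun m q => max m (q.1 + 1)) a := by
  intro vs
  induction vs with
  | nil => intro a; simp
  | cons q vs ih =>
    intro a
    rw [List.foldl_cons]
    exact le_trans (Nat.le_max_left _ _) (ih _)

lemma pvFoldMax_mem :
    ∀ (vs : List (Nat × Int)) (a : Nat) (p : Nat × Int), p ∈ vs →
      p.1 + 1 ≤ vs.foldl (fun m q => max m (q.1 + 1)) a := by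
  intro vs
  induction vs with
  | nil => intro a p h; simp at h
  | cons q vs ih =>
    intro a p hp
    rcases List.mem_cons.1 hp with rfl | hp
    · rw [List.foldl_cons]
      exact le_trans (Nat.le_max_right _ _) (pvFoldMax_ge_start vs _)
    · rw [List.foldl_cons]
      exact ih _ p hp

-- flatMap over a longer range adds nothing when the later levels are empty
lemma pvRangeExt (L : Nat → List Int) :
    ∀ (m j : Nat), (∀ k, m ≤ k → L k = []) →
      (List.range (m + j)).flatMap L = (List.range m).flatMap L := by
  intro m j
  induction j with
  | zero => intro _; rfl
  | succ j ih =>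
    intro h
    rw [show m + (j + 1) = (m + j) + 1 from by omega, List.range_succ, List.flatMap_append, ih h]
    simp [h (m + j) (by omega)]

lemma pvFoldFlat :
    ∀ (ls : List (List Int)) (acc : List Int), ls.foldl (fun r lv => r ++ lv) acc = acc ++ ls.flatten := by
  intro ls
  induction ls with
  | nil => intro acc; simp
  | cons l ls ih => intro acc; simp [ih]

-- ===== VERDICT (by name: the statement is the Claim_ definition above) =====
theorem sort_topologically_py_spec : Claim_equal_sort_topologically_py := by
  intro first topology _ hpre
  obtain ⟨hnd, hcyc⟩ := hpre
  show sort_topologically_py first topology = sort_topologically_py_alt first topology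
  unfold sort_topologically_py sort_topologically_py_alt
  rw [pvAnc_eq]
  set n := topology.length with hn
  set c : Int → List Int := fun v => (pvAncB topology).getD v [] with hc
  have hdead : pvIter c (n + 1) [first] = [] := pvDeath topology hnd first hcyc
  have hcount : ((List.range (n + 1)).map (fun j => (pvIter c j [first]).length)).sum ≤ n + 1 := by
    have := pvCount topology hnd first hcyc
    rwa [List.length_flatMap] at this
  -- A side: the queue loop emits the levels in order
  rw [pvBfsA_append, pvTravLevels c (n + 1) (n + 1) [first] hdead hcount, List.nil_append]
  -- B side: the DFS buckets hold exactly the levels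
  rw [pvDfsB_eq_foldl]
  set vs := pvVisits c (n + 1) [(0, first)] with hvs
  have hgr : pvGraded ([] : List (List Int)).length vs :=
    pvGradedVisits c (n + 1) [(0, first)] 0 (by simp)
  rw [pvFoldBuckets vs [] hgr]
  set M := vs.foldl (fun m p => max m (p.1 + 1)) ([] : List (List Int)).length with hM
  have hFK : ∀ k, (vs.filter (fun p => p.1 == k)).map Prod.snd = pvIter c k [first] := by
    intro k
    have hdead0 : ∀ p ∈ [((0 : Nat), first)], pvIter c (n + 1 - p.1) [p.2] = [] := by
      intro p hp
      simp only [List.mem_singleton] at hp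
      subst hp
      simpa using hdead
    have hsum0 : (([((0 : Nat), first)]).map (fun p => pvSz c (n + 1) p.1 p.2)).sum ≤ n + 1 := by
      simp only [List.map_cons, List.map_nil, List.sum_cons, List.sum_nil, Nat.add_zero]
      unfold pvSz
      simpa using hcount
    have h := pvFilterVisits c (n + 1) (n + 1) [((0 : Nat), first)] hdead0 hsum0 k
    rw [← hvs] at h
    rw [h]
    simp
  have hlvl_nil : ∀ k, n + 1 ≤ k → pvIter c k [first] = [] := by
    intro k hk
    rw [show k = (n + 1) + (k - (n + 1)) from by omega, pvIter_add, hdead, pvIter_nil]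
  have hdepth : ∀ p ∈ vs, p.1 + 1 ≤ n + 1 := by
    intro p hp
    by_contra hcontra
    have h1 : p.2 ∈ (vs.filter (fun q => q.1 == p.1)).map Prod.snd :=
      List.mem_map.2 ⟨p, List.mem_filter.2 ⟨hp, by simp⟩, rfl⟩
    rw [hFK p.1, hlvl_nil p.1 (by omega)] at h1
    simp at h1
  have hMle : M ≤ n + 1 := pvFoldMax_le vs _ (n + 1) (by simp) hdepth
  have hMemp : ∀ k, M ≤ k → pvIter c k [first] = [] := by
    intro k hk
    have hfe : vs.filter (fun p => p.1 == k) = [] := by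
      apply List.filter_eq_nil_iff.2
      intro p hp
      have := pvFoldMax_mem vs ([] : List (List Int)).length p hp
      rw [← hM] at this
      simp
      omega
    rw [← hFK k, hfe]
    rfl
  -- both sides are the concatenation of the levels
  rw [pvFoldFlat _ [], List.nil_append, ← List.flatMap_def]
  have hbuck : (List.range M).flatMap
      (fun k => (List.getD [] k []) ++ (vs.filter (fun p => p.1 == k)).map Prod.snd)
        = (List.range M).flatMap (fun k => pvIter c k [first]) := by
    apply List.flatMap_congr
    intro k _
    rw [hFK k]
    rfl
  rw [hbuck]
  rw [show n + 1 = M + (n + 1 - M) from by omega,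
    pvRangeExt (fun k => pvIter c k [first]) M (n + 1 - M) hMemp]
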